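-- pv_equiv track=rewrite | github.com/Algo-Goer/LeetCodeSolutions | 2022/0122_1332.删除回文子序列2双指针.py | removePalindromeSub
-- ===== SOURCE A (Python) =====
-- def removePalindromeSub(s: str) -> int:
--     left, right = 0, len(s) - 1
--     ans = 0
--     while left < right:
--         if s[left] != s[right]:
--             ans = 2
--             break  # 跳出while循环
--         left += 1
--         right -= 1
--     else:
--         ans = 1
--     return ans
-- ===== SOURCE B (Python) =====
-- def removePalindromeSub(s: str) -> int:
--     return 1 if s == s[::-1] else 2
-- ===== Notes on version B (the rewrite author's own statement) =====
-- stated objective: simpler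
-- what changed: Replaces the two-pointer inward scan with early break by a single bulk comparison of the string against its slice-reversed copy.
import Mathlib
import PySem

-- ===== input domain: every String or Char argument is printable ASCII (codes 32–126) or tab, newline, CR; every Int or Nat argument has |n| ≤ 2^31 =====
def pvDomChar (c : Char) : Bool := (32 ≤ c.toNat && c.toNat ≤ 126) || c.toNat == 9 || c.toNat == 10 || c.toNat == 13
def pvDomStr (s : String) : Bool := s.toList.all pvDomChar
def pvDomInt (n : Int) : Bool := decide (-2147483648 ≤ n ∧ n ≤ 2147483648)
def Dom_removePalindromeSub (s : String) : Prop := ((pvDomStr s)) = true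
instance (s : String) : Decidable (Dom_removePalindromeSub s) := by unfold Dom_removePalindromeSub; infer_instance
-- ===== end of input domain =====

-- B replaces A's two-pointer inward scan (with early break) by one bulk
-- comparison of the string with its reversed copy; objective: simpler.

-- ===== PORT A =====
-- the while-loop of A: scan inward while left < right, break with 2 on mismatch
def pvLoopA (l : List Char) (left right : Nat) : Int :=
  if left < right then
    if l.getD left ' ' ≠ l.getD right ' ' then 2
    else pvLoopA l (left + 1) (right - 1)
  else 1
termination_by right - left

def removePalindromeSub (s : String) : Int :=
  pvLoopA s.toList 0 (s.toList.length - 1)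

-- ===== PORT B =====
def removePalindromeSub_alt (s : String) : Int :=
  if s.toList = s.toList.reverse then 1 else 2

-- ===== PRECONDITION & SPEC =====
def Spec_removePalindromeSub (s : String) (out : Int) : Prop := out = removePalindromeSub_alt s
instance (s : String) (out : Int) : Decidable (Spec_removePalindromeSub s out) := by unfold Spec_removePalindromeSub; infer_instance

-- ===== CLAIM (what is proved, stated in full; the proofs are below) =====
def Claim_equal_removePalindromeSub : Prop := ∀ (s : String), Dom_removePalindromeSub s → Spec_removePalindromeSub s (removePalindromeSub s)

-- ===== LEMMAS AND PROOFS =====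

-- characterisation of A's loop: returns 1 iff every scanned pair matches
theorem pvLoopA_eq (l : List Char) (left right : Nat) :
    pvLoopA l left right =
      if ∀ i < right, left ≤ i → l.getD i ' ' = l.getD (left + right - i) ' '
      then 1 else 2 := by
  fun_induction pvLoopA l left right with
  | case1 left right hlt hne =>
      -- mismatch at (left, right): condition fails at i = left
      rw [if_neg]
      intro hall
      exact hne (by simpa using hall left hlt le_rfl)
  | case2 left right hlt heq ih =>
      rw [ih]
      have harith : left + 1 + (right - 1) = left + right := by omega
      by_cases hall : ∀ i < right, left ≤ i → l.getD i ' ' = l.getD (left + right - i) ' '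
      · rw [if_pos, if_pos hall]
        intro i hi hle
        rw [harith]
        exact hall i (by omega) (by omega)
      · rw [if_neg, if_neg hall]
        intro hall'
        apply hall
        intro i hi hle
        rcases Nat.lt_or_ge i (left + 1) with h1 | h1
        · -- i = left
          have hi_eq : i = left := by omega
          have e : left + right - i = right := by omega
          rw [e, hi_eq]
          simpa using heq
        · rcases Nat.lt_or_ge i (right - 1) with h2 | h2
          · have := hall' i h2 h1
            rwa [harith] at this
          · -- i = right - 1
            have hie : i = right - 1 := by omega
            subst hie
            rcases Nat.lt_or_ge (left + 1) (right - 1) with h3 | h3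
            · have := hall' (left + 1) h3 le_rfl
              rw [harith] at this
              have e1 : left + right - (left + 1) = right - 1 := by omega
              have e2 : left + right - (right - 1) = left + 1 := by omega
              rw [e1] at this
              rw [e2, ← this]
            · -- left + 1 = right - 1 (middle element) or right = left + 1
              have : left + right - (right - 1) = right - 1 := by omega
              rw [this]
  | case3 left right hlt =>
      rw [if_pos]
      intro i hi hle
      omega

theorem pal_iff (l : List Char) :
    (∀ i < l.length - 1, 0 ≤ i → l.getD i ' ' = l.getD (0 + (l.length - 1) - i) ' ')
      ↔ l = l.reverse := by
  constructor
  · intro h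
    apply List.ext_getElem (by simp)
    intro i h1 h2
    simp only [List.getElem_reverse]
    rcases Nat.lt_or_ge i (l.length - 1) with hi | hi
    · have := h i hi (Nat.zero_le _)
      rw [List.getD_eq_getElem l ' ' h1, List.getD_eq_getElem l ' ' (by omega)] at this
      simpa using this
    · -- i = l.length - 1
      have hie : i = l.length - 1 := by omega
      subst hie
      rcases Nat.eq_or_lt_of_le (Nat.one_le_iff_ne_zero.mpr (by omega : l.length ≠ 0)) with h0 | h0
      · -- length 1
        have : l.length - 1 = 0 := by omega
        simp [this]
      · have := h 0 (by omega) le_rfl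
        rw [List.getD_eq_getElem l ' ' (by omega), List.getD_eq_getElem l ' ' (by omega)] at this
        simp only [Nat.zero_add, Nat.sub_zero] at this
        simp only [Nat.sub_self]
        exact this.symm
  · intro h i hi _
    rw [List.getD_eq_getElem l ' ' (by omega), List.getD_eq_getElem l ' ' (by omega)]
    have := List.getElem_of_eq h (by omega : i < l.length)
    rw [List.getElem_reverse] at this
    rw [this]
    congr 1
    omega

-- ===== VERDICT (by name: the statement is the Claim_ definition above) =====
theorem removePalindromeSub_spec : Claim_equal_removePalindromeSub := by
  intro s _
  unfold Spec_removePalindromeSub removePalindromeSub removePalindromeSub_alt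
  rw [pvLoopA_eq]
  by_cases h : s.toList = s.toList.reverse
  · rw [if_pos h, if_pos]
    intro i hi _
    exact (pal_iff s.toList).mpr h i hi (Nat.zero_le _)
  · rw [if_neg h, if_neg]
    intro hall
    exact h ((pal_iff s.toList).mp hall)
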